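-- pv_equiv track=rewrite | github.com/gabbybermudez1/499Similarity | winnowing.py | select_fingerprints
-- ===== SOURCE A (Python) =====
-- def select_fingerprints(hash_list, w):
--     '''
--     This helper function takes in a  set of
--
--     Parameters
--     ----------
--     hash_list : list of (int, int)
--
--     w : int
--         w represents the window size for which we select a rightmost minimum
--
--     Returns
--     -------
--     fingerprints : list of int
--     '''
--     fingerprints = []
--     min_index = -1
--     prev_min_index = -1
--     # traverse over the hash_list
--     for hash_index in range(len(hash_list) - w +1):
--         min_value =  float("inf")
--         #traverse over each window
--         for window_index in range(hash_index, hash_index + w ):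
--             if hash_list[window_index] <= min_value:
--                 min_index = window_index
--                 min_value = hash_list[window_index]
--         # If the minimum value of the previous window is no longer the minimum value
--         if min_index != prev_min_index:
--             prev_min_index = min_index
--             fingerprints.append(hash_list[min_index])
--     return fingerprints
-- ===== SOURCE B (Python) =====
-- def select_fingerprints(hash_list, w):
--     '''Winnowing fingerprint selection: O(n) monotonic-deque sliding-window
--     rightmost minimum, emitting a fingerprint whenever the minimum's index changes.'''
--     if w <= 0:
--         return []
--     fingerprints = []
--     dq = []          # indices; dq[head:] is the deque (values strictly increase with index)
--     head = 0
--     prev = -1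
--     for i, x in enumerate(hash_list):
--         while head < len(dq) and hash_list[dq[-1]] >= x:
--             dq.pop()
--         dq.append(i)
--         if dq[head] <= i - w:
--             head += 1
--         if i >= w - 1:
--             m = dq[head]
--             if m != prev:
--                 prev = m
--                 fingerprints.append(hash_list[m])
--     return fingerprints
-- ===== Notes on version B (the rewrite author's own statement) =====
-- stated objective: faster
-- what changed: A rescans every w-element window with a nested loop to find its rightmost minimum; B makes a single pass keeping a monotonic deque (a list plus head pointer) whose front is always the rightmost window minimum, emitting a fingerprint when that index changes.
import Mathlib
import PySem

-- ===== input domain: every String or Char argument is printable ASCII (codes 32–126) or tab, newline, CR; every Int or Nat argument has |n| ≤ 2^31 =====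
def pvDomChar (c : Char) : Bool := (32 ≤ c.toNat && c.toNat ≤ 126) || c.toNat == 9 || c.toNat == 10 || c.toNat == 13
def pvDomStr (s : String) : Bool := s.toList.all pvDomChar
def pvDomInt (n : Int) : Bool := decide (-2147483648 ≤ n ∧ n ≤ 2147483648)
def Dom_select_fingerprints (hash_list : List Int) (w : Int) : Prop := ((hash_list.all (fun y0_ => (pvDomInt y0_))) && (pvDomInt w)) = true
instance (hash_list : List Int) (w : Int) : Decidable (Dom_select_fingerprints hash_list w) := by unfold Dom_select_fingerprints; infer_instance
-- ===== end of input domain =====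

-- B replaces A's per-window rescan (O(n·w)) by a monotonic-deque sliding-window
-- rightmost minimum (O(n)); same return value, no argument is mutated.

-- ===== PORT A =====
-- inner loop: running rightmost minimum over one window; `none` plays float("inf")
def pvAInnerStep (hash_list : List Int) (mst : Int × Option Int) (wi : Int) : Int × Option Int :=
  let hv := PySem.List.pyGetD hash_list wi 0   -- index always in range in A
  if (match mst.2 with | none => true | some v => decide (hv ≤ v)) = true then (wi, some hv) else mst

def pvAStep (hash_list : List Int) (w : Int) (st : List Int × Int × Int) (hi : Int) :
    List Int × Int × Int :=
  -- st = (fingerprints, min_index, prev_min_index)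
  let inner := (PySem.List.pyRange hi (hi + w) 1).foldl (pvAInnerStep hash_list) (st.2.1, none)
  if inner.1 ≠ st.2.2 then (st.1 ++ [PySem.List.pyGetD hash_list inner.1 0], inner.1, inner.1)
  else (st.1, inner.1, st.2.2)

def select_fingerprints (hash_list : List Int) (w : Int) : List Int :=
  ((PySem.List.pyRange 0 ((hash_list.length : Int) - w + 1) 1).foldl
      (pvAStep hash_list w) ([], -1, -1)).1

-- ===== PORT B =====
-- `while head < len(dq) and hash_list[dq[-1]] >= x: dq.pop()`
-- (the extra `0 ≤ head` only makes the recursion total; in B head is always ≥ 0)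
def pvPop (hash_list : List Int) (x : Int) (head : Int) (dq : List Int) : List Int :=
  if h : 0 ≤ head ∧ head < (dq.length : Int) ∧
      x ≤ PySem.List.pyGetD hash_list (PySem.List.pyGetD dq (-1) 0) 0 then
    pvPop hash_list x head dq.dropLast
  else dq
termination_by dq.length
decreasing_by
  obtain ⟨h0, h1, -⟩ := h
  have : 0 < dq.length := by exact_mod_cast lt_of_le_of_lt h0 h1
  simpa [List.length_dropLast] using by omega

def pvBStep (hash_list : List Int) (w : Int) (st : List Int × Int × Int × List Int)
    (p : Int × Int) : List Int × Int × Int × List Int :=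
  -- st = (dq, head, prev, fingerprints), p = (i, x)
  let dq := pvPop hash_list p.2 st.2.1 st.1 ++ [p.1]
  let head := if PySem.List.pyGetD dq st.2.1 0 ≤ p.1 - w then st.2.1 + 1 else st.2.1
  if w - 1 ≤ p.1 then
    let m := PySem.List.pyGetD dq head 0
    if m ≠ st.2.2.1 then (dq, head, m, st.2.2.2 ++ [PySem.List.pyGetD hash_list m 0])
    else (dq, head, st.2.2.1, st.2.2.2)
  else (dq, head, st.2.2.1, st.2.2.2)

def select_fingerprints_alt (hash_list : List Int) (w : Int) : List Int :=
  if w ≤ 0 then []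
  else ((PySem.List.enumerate hash_list 0).foldl (pvBStep hash_list w) ([], 0, -1, [])).2.2.2

-- ===== PRECONDITION & SPEC =====
def Spec_select_fingerprints (hash_list : List Int) (w : Int) (out : List Int) : Prop := out = select_fingerprints_alt hash_list w
instance (hash_list : List Int) (w : Int) (out : List Int) : Decidable (Spec_select_fingerprints hash_list w out) := by unfold Spec_select_fingerprints; infer_instance

-- ===== CLAIM (what is proved, stated in full; the proofs are below) =====
def Claim_equal_select_fingerprints : Prop := ∀ (hash_list : List Int) (w : Int), Dom_select_fingerprints hash_list w → Spec_select_fingerprints hash_list w (select_fingerprints hash_list w)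

-- ===== LEMMAS AND PROOFS =====

-- value at an index (proof-side abbreviation)
def pvH (hl : List Int) (j : Int) : Int := PySem.List.pyGetD hl j 0

-- rightmost minimum of the window [s, s+w)
def IsRMin (hl : List Int) (w s m : Int) : Prop :=
  s ≤ m ∧ m < s + w ∧ (∀ k, s ≤ k → k < s + w → pvH hl m ≤ pvH hl k) ∧
    (∀ k, m < k → k < s + w → pvH hl m < pvH hl k)

-- the index A's inner loop computes for window s
def pvRM (hl : List Int) (w s : Int) : Int :=
  ((PySem.List.pyRange s (s + w) 1).foldl (pvAInnerStep hl) (-1, none)).1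

-- emit-on-change over the per-window argmin list
def pvEmit (hl : List Int) : Int → List Int → List Int
  | _, [] => []
  | prev, m :: ms => (if m ≠ prev then [pvH hl m] else []) ++ pvEmit hl m ms

-- j is strictly below everything after it in the prefix [0, i)
def pvGood (hl : List Int) (i j : Int) : Prop := ∀ k, j < k → k < i → pvH hl j < pvH hl k

theorem rmin_uniq {hl : List Int} {w s m₁ m₂ : Int}
    (h₁ : IsRMin hl w s m₁) (h₂ : IsRMin hl w s m₂) : m₁ = m₂ := by
  obtain ⟨l₁, u₁, min₁, str₁⟩ := h₁
  obtain ⟨l₂, u₂, min₂, str₂⟩ := h₂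
  rcases lt_trichotomy m₁ m₂ with h | h | h
  · have := str₁ m₂ h u₂
    have := min₂ m₁ l₁ u₁
    omega
  · exact h
  · have := str₂ m₁ h u₁
    have := min₁ m₂ l₂ u₂
    omega

theorem inner_spec (hl : List Int) (s : Int) (t : Nat) (ht : 1 ≤ t) (mi : Int) :
    ∃ m, (PySem.List.pyRange s (s + (t : Int)) 1).foldl (pvAInnerStep hl) (mi, none)
        = (m, some (pvH hl m)) ∧ IsRMin hl (t : Int) s m := by
  induction t, ht using Nat.le_induction with
  | base =>
      refine ⟨s, ?_, ?_⟩
      · rw [show s + ((1 : Nat) : Int) = s + 1 by push_cast; ring, PySem.List.pyRange_one_singleton]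
        simp [pvAInnerStep, pvH]
      · refine ⟨le_refl s, by omega, ?_, by omega⟩
        intro k h1 h2
        have : k = s := by omega
        simp [this]
  | succ t ht ih =>
      obtain ⟨m, hfold, hs, hu, hmin, hstr⟩ := ih
      have hcast : s + ((t + 1 : Nat) : Int) = (s + (t : Int)) + 1 := by push_cast; ring
      rw [hcast, PySem.List.pyRange_one_succ_right (by omega : s ≤ s + (t : Int)),
        List.foldl_append, hfold]
      simp only [List.foldl_cons, List.foldl_nil]
      by_cases hc : pvH hl (s + (t : Int)) ≤ pvH hl m
      · refine ⟨s + (t : Int), ?_, ⟨by omega, by omega, ?_, by omega⟩⟩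
        · simp only [pvAInnerStep, pvH] at hc ⊢
          simp [hc]
        · intro k h1 h2
          rcases lt_or_ge k (s + (t : Int)) with hk | hk
          · exact le_trans hc (hmin k h1 hk)
          · have : k = s + (t : Int) := by omega
            simp [this]

      · refine ⟨m, ?_, ⟨hs, by omega, ?_, ?_⟩⟩
        · simp only [pvAInnerStep, pvH] at hc ⊢
          simp [hc]
        · intro k h1 h2
          rcases lt_or_ge k (s + (t : Int)) with hk | hk
          · exact hmin k h1 hk
          · have : k = s + (t : Int) := by omega
            subst this; omega
        · intro k h1 h2
          rcases lt_or_ge k (s + (t : Int)) with hk | hk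
          · exact hstr k h1 hk
          · have : k = s + (t : Int) := by omega
            subst this; omega

theorem inner_spec' (hl : List Int) (w : Int) (hw : 1 ≤ w) (s mi : Int) :
    (PySem.List.pyRange s (s + w) 1).foldl (pvAInnerStep hl) (mi, none)
      = (pvRM hl w s, some (pvH hl (pvRM hl w s))) ∧ IsRMin hl w s (pvRM hl w s) := by
  have hwt : w = ((w.toNat : Nat) : Int) := by omega
  have ht : 1 ≤ w.toNat := by omega
  obtain ⟨m, hm, hrm⟩ := inner_spec hl s w.toNat ht mi
  obtain ⟨m', hm', hrm'⟩ := inner_spec hl s w.toNat ht (-1)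
  have hpv : pvRM hl w s = m' := by rw [pvRM, hwt, hm']
  have hmm : m = m' := rmin_uniq hrm hrm'
  refine ⟨?_, ?_⟩
  · calc (PySem.List.pyRange s (s + w) 1).foldl (pvAInnerStep hl) (mi, none)
        = (PySem.List.pyRange s (s + (w.toNat : Int)) 1).foldl (pvAInnerStep hl) (mi, none) := by
          rw [← hwt]
      _ = (m, some (pvH hl m)) := hm
      _ = (pvRM hl w s, some (pvH hl (pvRM hl w s))) := by rw [hmm, ← hpv]
  · have h2 : IsRMin hl ((w.toNat : Nat) : Int) s (pvRM hl w s) := hpv ▸ hrm'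
    rwa [← hwt] at h2

theorem emit_snoc (hl : List Int) (p m : Int) (ms : List Int) :
    pvEmit hl p (ms ++ [m]) = pvEmit hl p ms ++ (if m ≠ ms.getLast?.getD p then [pvH hl m] else []) := by
  induction ms generalizing p with
  | nil => simp [pvEmit]
  | cons a ms ih =>
      simp only [List.cons_append, pvEmit, ih a]
      cases ms <;> simp [List.getLast?]

theorem a_outer (hl : List Int) (w : Int) (hw : 1 ≤ w) (L : List Int) :
    ∀ fps mi prev, (L.foldl (pvAStep hl w) (fps, mi, prev)).1
      = fps ++ pvEmit hl prev (L.map (pvRM hl w)) := by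
  induction L with
  | nil => intro fps mi prev; simp [pvEmit]
  | cons s L ih =>
      intro fps mi prev
      have h := inner_spec' hl w hw s mi
      simp only [List.foldl_cons, List.map_cons, pvEmit]
      rw [pvAStep, h.1]
      by_cases hc : pvRM hl w s = prev
      · simp [hc, ih]
      · simp [hc, ih, pvH, List.append_assoc]

theorem a_nonpos (hl : List Int) (w : Int) (hw : w ≤ 0) (L : List Int) :
    L.foldl (pvAStep hl w) ([], -1, -1) = ([], -1, -1) := by
  induction L with
  | nil => rfl
  | cons s L ih =>
      have : pvAStep hl w ([], -1, -1) s = ([], -1, -1) := by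
        rw [pvAStep]
        rw [PySem.List.pyRange_one_eq_nil (by omega)]
        simp
      simp [this, ih]

-- B-side invariant pieces -------------------------------------------------

theorem pop_eq (hl : List Int) (x : Int) (pre : List Int) (act : List Int) :
    pvPop hl x (pre.length : Int) (pre ++ act)
      = pre ++ (act.reverse.dropWhile (fun j => decide (x ≤ pvH hl j))).reverse := by
  induction act using List.reverseRecOn with
  | nil => rw [pvPop]; simp
  | append_singleton act' a ih =>
      rw [pvPop]
      have hlast : PySem.List.pyGetD (pre ++ (act' ++ [a])) (-1) 0 = a := by
        rw [show pre ++ (act' ++ [a]) = (pre ++ act') ++ [a] by simp]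
        exact PySem.List.pyGetD_neg_one_append_singleton _ _ _
      have hdl : (pre ++ (act' ++ [a])).dropLast = pre ++ act' := by
        rw [show pre ++ (act' ++ [a]) = (pre ++ act') ++ [a] by simp]
        exact List.dropLast_concat
      by_cases hxa : x ≤ pvH hl a
      · rw [dif_pos ⟨Int.natCast_nonneg _, by simp,
            by rw [hlast]; simpa [pvH] using hxa⟩, hdl, ih]
        simp [hxa]
      · rw [dif_neg (by rw [hlast]; intro hc; exact hxa (by simpa [pvH] using hc.2.2))]
        simp [hxa]

theorem pvGetDAppendHead (pre act : List Int) (h : act ≠ []) :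
    PySem.List.pyGetD (pre ++ act) (pre.length : Int) 0 = act.head h := by
  rw [PySem.List.pyGetD_natCast]
  simp [List.getD, List.getElem?_append_right,
    List.getElem?_eq_getElem (l := act) (i := 0) (by simpa using List.length_pos_iff.mpr h),
    List.getElem_zero_eq_head]

theorem pvHeadMin (l : List Int) (hne : l ≠ []) (hp : l.Pairwise (· < ·)) :
    ∀ j ∈ l, l.head hne ≤ j := by
  intro j hj
  rw [← List.cons_head_tail hne] at hj hp
  rcases List.mem_cons.mp hj with h | h
  · exact le_of_eq h.symm
  · exact le_of_lt ((List.pairwise_cons.mp hp).1 j h)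

-- the loop invariant of B: dq = pre ++ act with head = |pre|; act holds, in increasing
-- order, exactly the indices of the current window whose value is strictly below all
-- later prefix values; prev/fingerprints agree with emit-on-change over past windows
def pvInv (hl : List Int) (w i : Int) (st : List Int × Int × Int × List Int) : Prop :=
  ∃ pre act : List Int, st.1 = pre ++ act ∧ st.2.1 = (pre.length : Int) ∧
    act.Pairwise (· < ·) ∧
    (∀ j ∈ act, 0 ≤ j ∧ i - w ≤ j ∧ j < i ∧ pvGood hl i j) ∧
    (∀ j : Int, 0 ≤ j → i - w ≤ j → j < i → pvGood hl i j → j ∈ act) ∧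
    st.2.2.1 = ((PySem.List.pyRange 0 (i - w + 1) 1).map (pvRM hl w)).getLast?.getD (-1) ∧
    st.2.2.2 = pvEmit hl (-1) ((PySem.List.pyRange 0 (i - w + 1) 1).map (pvRM hl w))

theorem pvInvZero (hl : List Int) (w : Int) (hw : 1 ≤ w) : pvInv hl w 0 ([], 0, -1, []) := by
  refine ⟨[], [], rfl, rfl, List.Pairwise.nil, by simp, ?_, ?_, ?_⟩
  · intro j h0 _ h2 _
    exact absurd (lt_of_le_of_lt h0 h2) (lt_irrefl 0)
  · rw [PySem.List.pyRange_one_eq_nil (by omega)]; rfl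
  · rw [PySem.List.pyRange_one_eq_nil (by omega)]; rfl

theorem pvHeadIsRM (hl : List Int) (w i : Int) (hw : 1 ≤ w) (hiw : w - 1 ≤ i)
    (act3 : List Int) (hne : act3 ≠ []) (hpair3 : act3.Pairwise (· < ·))
    (hsound3 : ∀ j ∈ act3, 0 ≤ j ∧ (i + 1) - w ≤ j ∧ j < i + 1 ∧ pvGood hl (i + 1) j)
    (hcomp3 : ∀ j : Int, 0 ≤ j → (i + 1) - w ≤ j → j < i + 1 → pvGood hl (i + 1) j → j ∈ act3) :
    act3.head hne = pvRM hl w (i + 1 - w) := by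
  obtain ⟨-, hrm⟩ := inner_spec' hl w hw (i + 1 - w) 0
  obtain ⟨hrl, hru, hrmin, hrstr⟩ := hrm
  have hrmem : pvRM hl w (i + 1 - w) ∈ act3 :=
    hcomp3 _ (by omega) (by omega) (by omega) (fun k hk1 hk2 => hrstr k hk1 (by omega))
  obtain ⟨-, hml, hmu, hmg⟩ := hsound3 _ (List.head_mem hne)
  rcases eq_or_lt_of_le (pvHeadMin act3 hne hpair3 _ hrmem) with h | h
  · exact h
  · have h1 := hrmin (act3.head hne) (by omega) (by omega)
    have h2 := hmg (pvRM hl w (i + 1 - w)) h (by omega)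
    omega

theorem pvRangeSuccMap (hl : List Int) (w i : Int) (hiw : w - 1 ≤ i) :
    (PySem.List.pyRange 0 ((i + 1) - w + 1) 1).map (pvRM hl w)
      = (PySem.List.pyRange 0 (i - w + 1) 1).map (pvRM hl w) ++ [pvRM hl w (i + 1 - w)] := by
  rw [show (i + 1) - w + 1 = (i - w + 1) + 1 from by ring,
    PySem.List.pyRange_one_succ_right (by omega : (0 : Int) ≤ i - w + 1), List.map_append,
    show i + 1 - w = i - w + 1 from by ring]
  rfl

theorem pvInvStep (hl : List Int) (w : Int) (hw : 1 ≤ w) (i : Int) (hi0 : 0 ≤ i)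
    (hin : i < (hl.length : Int)) (st : List Int × Int × Int × List Int)
    (h : pvInv hl w i st) : pvInv hl w (i + 1) (pvBStep hl w st (i, pvH hl i)) := by
  obtain ⟨pre, act, hdq, hhead, hpair, hsound, hcomp, hprev, hfps⟩ := h
  have hpop : pvPop hl (pvH hl i) st.2.1 st.1
      = pre ++ (act.reverse.dropWhile (fun j => decide (pvH hl i ≤ pvH hl j))).reverse := by
    rw [hdq, hhead]; exact pop_eq hl (pvH hl i) pre act
  -- act1 : the deque after the pops
  have hsplit : act = (act.reverse.dropWhile (fun j => decide (pvH hl i ≤ pvH hl j))).reverse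
      ++ (act.reverse.takeWhile (fun j => decide (pvH hl i ≤ pvH hl j))).reverse := by
    calc act = act.reverse.reverse := (List.reverse_reverse act).symm
      _ = ((act.reverse.takeWhile (fun j => decide (pvH hl i ≤ pvH hl j)))
            ++ (act.reverse.dropWhile (fun j => decide (pvH hl i ≤ pvH hl j)))).reverse := by
          rw [List.takeWhile_append_dropWhile]
      _ = _ := by rw [List.reverse_append]
  generalize hact1 : (act.reverse.dropWhile (fun j => decide (pvH hl i ≤ pvH hl j))).reverse = act1 at hpop hsplit
  have hrest : ∀ j ∈ (act.reverse.takeWhile (fun j => decide (pvH hl i ≤ pvH hl j))).reverse,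
      pvH hl i ≤ pvH hl j := by
    intro j hj
    have := List.mem_takeWhile_imp (List.mem_reverse.mp hj)
    simpa using this
  have hsub1 : act1.Sublist act := by rw [hsplit]; exact List.sublist_append_left _ _
  have hmem1 : ∀ j ∈ act1, j ∈ act := fun j hj => hsub1.subset hj
  have hpair1 : act1.Pairwise (· < ·) := hpair.sublist hsub1
  have hkeep : ∀ j ∈ act, pvH hl j < pvH hl i → j ∈ act1 := by
    intro j hj hlt
    rw [hsplit] at hj
    rcases List.mem_append.mp hj with h | h
    · exact h
    · exact absurd (hrest j h) (by omega)
  have hval1 : ∀ j ∈ act1, pvH hl j < pvH hl i := by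
    intro j hj
    have hne : act.reverse.dropWhile (fun j => decide (pvH hl i ≤ pvH hl j)) ≠ [] := by
      intro hnil; rw [← hact1, hnil] at hj; simp at hj
    have hfa : (fun j => decide (pvH hl i ≤ pvH hl j))
        ((act.reverse.dropWhile (fun j => decide (pvH hl i ≤ pvH hl j))).head hne) = false :=
      List.head_dropWhile_not _ hne
    have hfa' : pvH hl ((act.reverse.dropWhile (fun j => decide (pvH hl i ≤ pvH hl j))).head hne)
        < pvH hl i := by simpa using hfa
    have hstruct : act1 = (act.reverse.dropWhile (fun j => decide (pvH hl i ≤ pvH hl j))).tail.reverse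
        ++ [(act.reverse.dropWhile (fun j => decide (pvH hl i ≤ pvH hl j))).head hne] := by
      rw [← hact1]
      have hcht := congrArg List.reverse (List.cons_head_tail hne)
      rw [List.reverse_cons] at hcht
      exact hcht.symm
    rcases List.mem_append.mp (hstruct ▸ hj) with hjt | hja
    · have hja' : j < (act.reverse.dropWhile (fun j => decide (pvH hl i ≤ pvH hl j))).head hne := by
        have hp := hstruct ▸ hpair1
        rw [List.pairwise_append] at hp
        exact hp.2.2 j hjt _ (by simp)
      have hain : (act.reverse.dropWhile (fun j => decide (pvH hl i ≤ pvH hl j))).head hne ∈ act :=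
        hmem1 _ (by rw [hstruct]; simp)
      have hji : pvGood hl i j := (hsound j (hmem1 j hj)).2.2.2
      have := hji _ hja' (hsound _ hain).2.2.1
      omega
    · have : j = (act.reverse.dropWhile (fun j => decide (pvH hl i ≤ pvH hl j))).head hne := by
        simpa using hja
      rw [this]; exact hfa'
  -- act2 : after pushing i
  have hact2ne : act1 ++ [i] ≠ [] := by simp
  have hlt_i : ∀ j ∈ act1, j < i := fun j hj => (hsound j (hmem1 j hj)).2.2.1
  have hpair2 : (act1 ++ [i]).Pairwise (· < ·) := by
    refine List.pairwise_append.mpr ⟨hpair1, by simp, ?_⟩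
    intro a ha b hb
    have : b = i := by simpa using hb
    exact this ▸ hlt_i a ha
  have hsound2 : ∀ j ∈ act1 ++ [i], 0 ≤ j ∧ i - w ≤ j ∧ j < i + 1 ∧ pvGood hl (i + 1) j := by
    intro j hj
    rcases List.mem_append.mp hj with hj1 | hji
    · obtain ⟨h0, h1, h2, h3⟩ := hsound j (hmem1 j hj1)
      refine ⟨h0, h1, by omega, ?_⟩
      intro k hk1 hk2
      rcases lt_or_ge k i with hk | hk
      · exact h3 k hk1 hk
      · have : k = i := by omega
        rw [this]; exact hval1 j hj1
    · have : j = i := by simpa using hji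
      subst this
      exact ⟨hi0, by omega, by omega, fun k hk1 hk2 => absurd hk2 (by omega)⟩
  have hcomp2 : ∀ j : Int, 0 ≤ j → i - w ≤ j → j < i + 1 → pvGood hl (i + 1) j
      → j ∈ act1 ++ [i] := by
    intro j h0 h1 h2 h3
    rcases lt_or_ge j i with hji | hji
    · have hg : pvGood hl i j := fun k hk1 hk2 => h3 k hk1 (by omega)
      have hjx : pvH hl j < pvH hl i := h3 i hji (by omega)
      exact List.mem_append_left _ (hkeep j (hcomp j h0 h1 hji hg) hjx)
    · have : j = i := by omega
      rw [this]; exact List.mem_append_right _ (by simp)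
  have hget : PySem.List.pyGetD (pre ++ (act1 ++ [i])) (pre.length : Int) 0
      = (act1 ++ [i]).head hact2ne := pvGetDAppendHead pre (act1 ++ [i]) hact2ne
  have ha0mem : (act1 ++ [i]).head hact2ne ∈ act1 ++ [i] := List.head_mem hact2ne
  have ha0min : ∀ j ∈ act1 ++ [i], (act1 ++ [i]).head hact2ne ≤ j := pvHeadMin _ hact2ne hpair2
  -- unfold the step
  simp only [pvBStep, hpop]
  rw [show pre ++ act1 ++ [i] = pre ++ (act1 ++ [i]) from by simp, hhead, hget, hprev, hfps]
  by_cases hexp : (act1 ++ [i]).head hact2ne ≤ i - w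
  · -- the window minimum expires: advance head past it
    have ha0eq : (act1 ++ [i]).head hact2ne = i - w := le_antisymm hexp (hsound2 _ ha0mem).2.1
    have hiwpos : 0 ≤ i - w := ha0eq ▸ (hsound2 _ ha0mem).1
    have htl : act1 ++ [i] = (act1 ++ [i]).head hact2ne :: (act1 ++ [i]).tail :=
      (List.cons_head_tail hact2ne).symm
    have hine : i ∈ (act1 ++ [i]).tail := by
      have : i ∈ act1 ++ [i] := List.mem_append_right _ (by simp)
      rw [htl] at this
      rcases List.mem_cons.mp this with h | h
      · exact absurd (h.trans ha0eq) (by omega)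
      · exact h
    have hne3 : (act1 ++ [i]).tail ≠ [] := List.ne_nil_of_mem hine
    have hdq2 : pre ++ (act1 ++ [i]) = (pre ++ [(act1 ++ [i]).head hact2ne]) ++ (act1 ++ [i]).tail := by
      conv_lhs => rw [htl]
      simp
    have hmemtl : ∀ j ∈ (act1 ++ [i]).tail, j ∈ act1 ++ [i] := by
      intro j hj; rw [htl]; exact List.mem_cons_of_mem _ hj
    have hgt : ∀ j ∈ (act1 ++ [i]).tail, i - w < j := by
      intro j hj
      have hp := htl ▸ hpair2
      exact ha0eq ▸ (List.pairwise_cons.mp hp).1 j hj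
    have hpair3 : (act1 ++ [i]).tail.Pairwise (· < ·) := (List.pairwise_cons.mp (htl ▸ hpair2)).2
    have hsound3 : ∀ j ∈ (act1 ++ [i]).tail,
        0 ≤ j ∧ (i + 1) - w ≤ j ∧ j < i + 1 ∧ pvGood hl (i + 1) j := by
      intro j hj
      obtain ⟨h0, h1, h2, h3⟩ := hsound2 j (hmemtl j hj)
      exact ⟨h0, by have := hgt j hj; omega, h2, h3⟩
    have hcomp3 : ∀ j : Int, 0 ≤ j → (i + 1) - w ≤ j → j < i + 1 → pvGood hl (i + 1) j
        → j ∈ (act1 ++ [i]).tail := by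
      intro j h0 h1 h2 h3
      have hj2 : j ∈ act1 ++ [i] := hcomp2 j h0 (by omega) h2 h3
      rw [htl] at hj2
      rcases List.mem_cons.mp hj2 with h | h
      · exact absurd (h.trans ha0eq) (by omega)
      · exact h
    have hiw : w - 1 ≤ i := by omega
    rw [if_pos hexp, hdq2,
      show (pre.length : Int) + 1 = (((pre ++ [(act1 ++ [i]).head hact2ne]).length : Int)) from by simp,
      pvGetDAppendHead _ _ hne3, if_pos hiw]
    have hmrm : (act1 ++ [i]).tail.head hne3 = pvRM hl w (i + 1 - w) :=
      pvHeadIsRM hl w i hw hiw _ hne3 hpair3 hsound3 hcomp3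
    by_cases hchg : (act1 ++ [i]).tail.head hne3
        ≠ ((PySem.List.pyRange 0 (i - w + 1) 1).map (pvRM hl w)).getLast?.getD (-1)
    · rw [if_pos hchg]
      refine ⟨pre ++ [(act1 ++ [i]).head hact2ne], (act1 ++ [i]).tail, rfl, rfl, hpair3,
        hsound3, hcomp3, ?_, ?_⟩
      · rw [pvRangeSuccMap hl w i hiw, List.getLast?_concat]
        simpa using hmrm
      · rw [pvRangeSuccMap hl w i hiw, emit_snoc, if_pos (by rw [← hmrm]; exact hchg)]
        simp [pvH, ← hmrm]
    · rw [if_neg hchg]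
      simp only [ne_eq, not_not] at hchg
      refine ⟨pre ++ [(act1 ++ [i]).head hact2ne], (act1 ++ [i]).tail, rfl, rfl, hpair3,
        hsound3, hcomp3, ?_, ?_⟩
      · rw [pvRangeSuccMap hl w i hiw, List.getLast?_concat]
        simpa using hchg.symm.trans hmrm
      · rw [pvRangeSuccMap hl w i hiw, emit_snoc,
          if_neg (by rw [← hmrm]; simpa using hchg)]
        simp
  · -- the old window minimum survives: head is unchanged
    have hsound3 : ∀ j ∈ act1 ++ [i],
        0 ≤ j ∧ (i + 1) - w ≤ j ∧ j < i + 1 ∧ pvGood hl (i + 1) j := by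
      intro j hj
      obtain ⟨h0, h1, h2, h3⟩ := hsound2 j hj
      refine ⟨h0, ?_, h2, h3⟩
      have h4 := ha0min j hj
      have h5 := (hsound2 _ ha0mem).1
      omega
    have hcomp3 : ∀ j : Int, 0 ≤ j → (i + 1) - w ≤ j → j < i + 1 → pvGood hl (i + 1) j
        → j ∈ act1 ++ [i] := fun j h0 h1 h2 h3 => hcomp2 j h0 (by omega) h2 h3
    rw [if_neg hexp, hget]
    by_cases hiw : w - 1 ≤ i
    · rw [if_pos hiw]
      have hmrm : (act1 ++ [i]).head hact2ne = pvRM hl w (i + 1 - w) :=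
        pvHeadIsRM hl w i hw hiw _ hact2ne hpair2 hsound3 hcomp3
      by_cases hchg : (act1 ++ [i]).head hact2ne
          ≠ ((PySem.List.pyRange 0 (i - w + 1) 1).map (pvRM hl w)).getLast?.getD (-1)
      · rw [if_pos hchg]
        refine ⟨pre, act1 ++ [i], rfl, rfl, hpair2, hsound3, hcomp3, ?_, ?_⟩
        · rw [pvRangeSuccMap hl w i hiw, List.getLast?_concat]
          simpa using hmrm
        · rw [pvRangeSuccMap hl w i hiw, emit_snoc, if_pos (by rw [← hmrm]; exact hchg)]
          simp [pvH, ← hmrm]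
      · rw [if_neg hchg]
        simp only [ne_eq, not_not] at hchg
        refine ⟨pre, act1 ++ [i], rfl, rfl, hpair2, hsound3, hcomp3, ?_, ?_⟩
        · rw [pvRangeSuccMap hl w i hiw, List.getLast?_concat]
          simpa using hchg.symm.trans hmrm
        · rw [pvRangeSuccMap hl w i hiw, emit_snoc,
            if_neg (by rw [← hmrm]; simpa using hchg)]
          simp
    · rw [if_neg hiw]
      have hr1 : PySem.List.pyRange 0 ((i + 1) - w + 1) 1 = [] :=
        PySem.List.pyRange_one_eq_nil (by omega)
      have hr2 : PySem.List.pyRange 0 (i - w + 1) 1 = [] :=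
        PySem.List.pyRange_one_eq_nil (by omega)
      exact ⟨pre, act1 ++ [i], rfl, rfl, hpair2, hsound3, hcomp3,
        by rw [hr1, hr2], by rw [hr1, hr2]⟩

theorem pvInvFold (hl : List Int) (w : Int) (hw : 1 ≤ w) :
    ∀ t : Nat, (t : Int) ≤ (hl.length : Int) →
      pvInv hl w (t : Int) ((PySem.List.pyRange 0 (t : Int) 1).foldl
        (fun st j => pvBStep hl w st (j, PySem.List.pyGetD hl j 0)) ([], 0, -1, [])) := by
  intro t
  induction t with
  | zero =>
      intro _
      rw [show ((0 : Nat) : Int) = 0 from rfl, PySem.List.pyRange_one_eq_nil (by omega)]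
      exact pvInvZero hl w hw
  | succ t ih =>
      intro hle
      have h1 : ((t + 1 : Nat) : Int) = (t : Int) + 1 := by push_cast; ring
      rw [h1, PySem.List.pyRange_one_succ_right (by omega : (0 : Int) ≤ (t : Int)),
        List.foldl_append]
      simp only [List.foldl_cons, List.foldl_nil]
      exact pvInvStep hl w hw (t : Int) (by omega) (by omega) _ (ih (by omega))

theorem b_eq_emit (hl : List Int) (w : Int) (hw : 1 ≤ w) :
    select_fingerprints_alt hl w
      = pvEmit hl (-1) ((PySem.List.pyRange 0 ((hl.length : Int) - w + 1) 1).map (pvRM hl w)) := by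
  rw [select_fingerprints_alt, if_neg (by omega), PySem.List.enumerate_eq_map_pyRange (d := 0),
    List.foldl_map]
  obtain ⟨pre, act, -, -, -, -, -, -, hfps⟩ := pvInvFold hl w hw hl.length (le_refl _)
  exact hfps

-- ===== VERDICT (by name: the statement is the Claim_ definition above) =====
theorem select_fingerprints_spec : Claim_equal_select_fingerprints := by
  intro hl w _
  unfold Spec_select_fingerprints
  by_cases hw : w ≤ 0
  · unfold select_fingerprints select_fingerprints_alt
    rw [a_nonpos hl w hw]
    simp [hw]
  · have hw1 : 1 ≤ w := by omega
    rw [b_eq_emit hl w hw1]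
    unfold select_fingerprints
    rw [a_outer hl w hw1 _ [] (-1) (-1)]
    simp
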